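-- pv_equiv track=rewrite | github.com/IAmSingleton6/adventofcode-2025 | day2/part2.py | _all_divisions_identical
-- ===== SOURCE A (Python) =====
-- def _all_divisions_identical(str_id: str, divisor: int) -> bool:
--     str_len = len(str_id)
--     first_segment = str_id[0:divisor]
--
--     for i in range(divisor, str_len, divisor):
--         segment = str_id[i:i + divisor]
--         if segment != first_segment:
--             return False
--
--     return True
-- ===== SOURCE B (Python) =====
-- def _all_divisions_identical(str_id: str, divisor: int) -> bool:
--     first_segment = str_id[0:divisor]
--     repeats = -(-len(str_id) // divisor)
--     return str_id == first_segment * repeats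
-- ===== Notes on version B (the rewrite author's own statement) =====
-- stated objective: idiomatic
-- what changed: Replaces the segment-by-segment loop with a closed-form check: rebuild the string as the first segment repeated ceil(len/divisor) times and compare once.
-- outside the precondition, e.g. on _all_divisions_identical('ab', 0): A raises ValueError, B raises ZeroDivisionError; on _all_divisions_identical('ab', -1): A returns True, B returns False
import Mathlib
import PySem

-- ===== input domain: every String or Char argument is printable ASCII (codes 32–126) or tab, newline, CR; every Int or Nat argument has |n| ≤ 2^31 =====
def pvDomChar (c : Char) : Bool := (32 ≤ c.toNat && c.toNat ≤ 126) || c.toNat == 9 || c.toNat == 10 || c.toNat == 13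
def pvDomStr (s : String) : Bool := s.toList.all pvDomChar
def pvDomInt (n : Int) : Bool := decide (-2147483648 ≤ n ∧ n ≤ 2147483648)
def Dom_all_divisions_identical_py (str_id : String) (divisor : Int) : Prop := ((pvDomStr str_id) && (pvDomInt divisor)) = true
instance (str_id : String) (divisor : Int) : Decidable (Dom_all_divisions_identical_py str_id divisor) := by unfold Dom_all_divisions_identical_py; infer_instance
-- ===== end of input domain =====

-- B replaces A's segment-by-segment loop with a closed-form check (first segment
-- repeated ceil(len/divisor) times, compared once); equivalence proved for divisor ≥ 1.


-- ===== PORT A =====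
-- the for-loop over range(divisor, str_len, divisor) with early return False
def adiLoop (l : List Char) (d : Int) (first : List Char) : List Int → Bool
  | [] => true
  | i :: rest =>
      if PySem.List.slice l (some i) (some (i + d)) ≠ first then false
      else adiLoop l d first rest

def all_divisions_identical_py (str_id : String) (divisor : Int) : Bool :=
  let l := str_id.toList
  let str_len : Int := (l.length : Int)
  let first_segment := PySem.List.slice l (some 0) (some divisor)
  adiLoop l divisor first_segment (PySem.List.pyRange divisor str_len divisor)

-- ===== PORT B =====
-- Python's  s * k  on strings: empty for k ≤ 0 (Int.toNat clamps exactly so)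
def pyStrMul (l : List Char) (k : Int) : List Char :=
  List.flatten (List.replicate k.toNat l)

def all_divisions_identical_py_alt (str_id : String) (divisor : Int) : Bool :=
  let l := str_id.toList
  let first_segment := PySem.List.slice l (some 0) (some divisor)
  let repeats : Int := -(PySem.Int.floordiv (-(l.length : Int)) divisor)
  l == pyStrMul first_segment repeats

-- ===== PRECONDITION & SPEC =====
-- Pre_ excludes divisor ≤ 0: at divisor = 0 A raises ValueError (range step zero), and for
-- negative divisor A's vacuous True (the stepped range is empty) and B's False on nonempty
-- strings are both accidental values for a nonsensical segment size no caller would specify.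
def Pre_all_divisions_identical_py (str_id : String) (divisor : Int) : Prop := 1 ≤ divisor
instance (str_id : String) (divisor : Int) : Decidable (Pre_all_divisions_identical_py str_id divisor) := by unfold Pre_all_divisions_identical_py; infer_instance
def pvWitness_all_divisions_identical_py : String × Int := ("abab", 2)

def Spec_all_divisions_identical_py (str_id : String) (divisor : Int) (out : Bool) : Prop := out = all_divisions_identical_py_alt str_id divisor
instance (str_id : String) (divisor : Int) (out : Bool) : Decidable (Spec_all_divisions_identical_py str_id divisor out) := by unfold Spec_all_divisions_identical_py; infer_instance

-- ===== CLAIM (what is proved, stated in full; the proofs are below) =====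
def Claim_equal_all_divisions_identical_py : Prop := ∀ (str_id : String) (divisor : Int), Dom_all_divisions_identical_py str_id divisor → Pre_all_divisions_identical_py str_id divisor → Spec_all_divisions_identical_py str_id divisor (all_divisions_identical_py str_id divisor)

-- ===== LEMMAS AND PROOFS =====

-- shifting every loop index by d is the same as dropping the first segment
lemma adiLoop_shift (l : List Char) (d : Int) (hd : 0 < d) (first : List Char)
    (r : List Int) (hr : ∀ i ∈ r, 0 ≤ i) :
    adiLoop l d first (r.map (· + d)) = adiLoop (l.drop d.toNat) d first r := by
  induction r with
  | nil => rfl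
  | cons i rest ih =>
      have hi : 0 ≤ i := hr i (by simp)
      have hseg : PySem.List.slice l (some (i + d)) (some (i + d + d))
          = PySem.List.slice (l.drop d.toNat) (some i) (some (i + d)) := by
        rw [PySem.List.slice_toNat l (by omega) (by omega),
            PySem.List.slice_toNat (l.drop d.toNat) hi (by omega),
            List.drop_drop,
            show (i + d + d).toNat - (i + d).toNat = (i + d).toNat - i.toNat by omega,
            show (i + d).toNat = d.toNat + i.toNat by omega]
      simp only [List.map_cons, adiLoop, hseg]
      rw [ih (fun j hj => hr j (by simp [hj]))]

-- the stepped range unrolled once (step = segment size d)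
lemma pyRange_step_cons (d n : Int) (hd : 0 < d) (hn : d < n) :
    PySem.List.pyRange d n d = d :: (PySem.List.pyRange d (n - d) d).map (· + d) := by
  rw [PySem.List.pyRange_of_pos d n hd, PySem.List.pyRange_of_pos d (n - d) hd]
  by_cases h2 : d < n - d
  · have hc : ((n - d + d - 1) / d).toNat = ((n - d - d + d - 1) / d).toNat + 1 := by
      have : n - d + d - 1 = (n - d - d + d - 1) + 1 * d := by ring
      rw [this, Int.add_mul_ediv_right _ _ (by omega)]
      have h0 : 0 ≤ (n - d - d + d - 1) / d := by
        have := (Int.le_ediv_iff_mul_le (a := 0) (b := n - d - d + d - 1) hd).mpr (by omega)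
        omega
      omega
    simp only [if_pos hn, if_pos h2, hc, List.range_succ_eq_map, List.map_cons, List.map_map]
    congr 1
    · push_cast; ring
    · apply List.map_congr_left; intro k _
      simp only [Function.comp_apply, Nat.succ_eq_add_one]; push_cast; ring
  · rw [if_pos hn, if_neg h2]
    have h1 : ((n - d + d - 1) / d) = 1 := by
      have ha := (Int.le_ediv_iff_mul_le (a := 1) (b := n - d + d - 1) hd).mpr (by omega)
      have hb := (Int.ediv_lt_iff_lt_mul (a := n - d + d - 1) (b := 2) hd).mpr (by omega)
      omega
    rw [h1]
    norm_num

-- the ceiling count: one and step cases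
lemma ceilcnt_one (d n : Int) (hd : 0 < d) (h1 : 0 < n) (h2 : n ≤ d) :
    -(PySem.Int.floordiv (-n) d) = 1 :=
  (PySem.Int.neg_floordiv_neg_eq_iff_of_pos hd).mpr ⟨by omega, by omega⟩

lemma ceilcnt_step (d n : Int) (hd : 0 < d) :
    -(PySem.Int.floordiv (-n) d) = -(PySem.Int.floordiv (-(n - d)) d) + 1 := by
  have h := (PySem.Int.neg_floordiv_neg_eq_iff_of_pos (a := n - d) hd).mp rfl
  exact (PySem.Int.neg_floordiv_neg_eq_iff_of_pos hd).mpr ⟨by nlinarith [h.1, h.2], by nlinarith [h.1, h.2]⟩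

lemma ceilcnt_pos (d n : Int) (hd : 0 < d) (hn : 0 < n) :
    0 < -(PySem.Int.floordiv (-n) d) := by
  have h := (PySem.Int.neg_floordiv_neg_eq_iff_of_pos (a := n) hd).mp rfl
  nlinarith [h.1, h.2]

-- the core equivalence on the char-list level, by strong induction on the length
lemma adi_main (d : Int) (hd : 1 ≤ d) : ∀ (k : Nat) (l : List Char), l.length ≤ k →
    adiLoop l d (l.take d.toNat) (PySem.List.pyRange d (l.length : Int) d)
      = (l == pyStrMul (l.take d.toNat) (-(PySem.Int.floordiv (-(l.length : Int)) d))) := by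
  intro k
  induction k with
  | zero =>
      intro l hl
      have : l = [] := List.eq_nil_of_length_eq_zero (by omega)
      subst this
      rw [show (([] : List Char).length : Int) = 0 by simp,
          PySem.List.pyRange_of_pos d 0 (by omega), if_neg (by omega)]
      simp [adiLoop, pyStrMul]
  | succ k ih =>
      intro l hl
      have hd0 : 0 < d := by omega
      have hdn : (d.toNat : Int) = d := Int.toNat_of_nonneg (by omega)
      by_cases hbig : d < (l.length : Int)
      · -- at least one loop iteration
        have hlen : d.toNat < l.length := by omega
        rw [pyRange_step_cons d _ hd0 hbig]
        have hslice : PySem.List.slice l (some d) (some (d + d))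
            = (l.drop d.toNat).take d.toNat := by
          rw [PySem.List.slice_toNat l (by omega) (by omega)]
          congr 1; omega
        simp only [adiLoop, hslice]
        by_cases hseg : (l.drop d.toNat).take d.toNat = l.take d.toNat
        · -- first comparison passes: recurse on the dropped list
          rw [if_neg (not_ne_iff.mpr hseg)]
          rw [adiLoop_shift l d hd0 _ _ (fun i hi => by
            have := (PySem.List.mem_pyRange_iff_of_pos hd0 i).mp hi; omega)]
          have hlen' : ((l.drop d.toNat).length : Int) = (l.length : Int) - d := by
            simp [List.length_drop]; omega
          have ihd := ih (l.drop d.toNat) (by simp [List.length_drop]; omega)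
          rw [← hseg, ← hlen', ihd, Bool.eq_iff_iff, beq_iff_eq, beq_iff_eq, hlen',
              ceilcnt_step d (l.length : Int) hd0]
          have hcnt : 0 < -(PySem.Int.floordiv (-((l.length : Int) - d)) d) :=
            ceilcnt_pos d _ hd0 (by omega)
          simp only [pyStrMul]
          rw [show (-(PySem.Int.floordiv (-((l.length:Int) - d)) d) + 1).toNat
                = (-(PySem.Int.floordiv (-((l.length:Int) - d)) d)).toNat + 1 by omega]
          simp only [List.replicate_succ, List.flatten_cons, hseg]
          constructor
          · intro h
            conv_lhs => rw [← List.take_append_drop d.toNat l]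
            rw [← h]
          · intro h
            have h2 : l.take d.toNat ++ l.drop d.toNat
                = l.take d.toNat ++ List.flatten (List.replicate (-(PySem.Int.floordiv (-((l.length:Int) - d)) d)).toNat (l.take d.toNat)) := by
              rw [List.take_append_drop]; exact h
            exact List.append_cancel_left h2
        · -- first comparison fails: A returns False; B's reconstruction cannot match
          rw [if_pos hseg, eq_comm, beq_eq_false_iff_ne]
          intro h
          apply hseg
          have hcnt := ceilcnt_step d (l.length : Int) hd0
          have hpos : 0 < -(PySem.Int.floordiv (-((l.length : Int) - d)) d) :=
            ceilcnt_pos d _ hd0 (by omega)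
          rw [hcnt] at h
          simp only [pyStrMul] at h
          rw [show (-(PySem.Int.floordiv (-((l.length:Int) - d)) d) + 1).toNat
                = (-(PySem.Int.floordiv (-((l.length:Int) - d)) d)).toNat + 1 by omega] at h
          simp only [List.replicate_succ, List.flatten_cons] at h
          have hfl : (l.take d.toNat).length = d.toNat := by
            rw [List.length_take]; omega
          have hdrop : l.drop d.toNat
              = List.flatten (List.replicate (-(PySem.Int.floordiv (-((l.length:Int) - d)) d)).toNat (l.take d.toNat)) := by
            conv_lhs => rw [h]
            exact List.drop_left' hfl
          rw [hdrop, show (-(PySem.Int.floordiv (-((l.length:Int) - d)) d)).toNat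
                = ((-(PySem.Int.floordiv (-((l.length:Int) - d)) d)).toNat - 1) + 1 by omega]
          simp only [List.replicate_succ, List.flatten_cons]
          rw [List.take_append_of_le_length (by omega), List.take_of_length_le (by omega)]
      · -- no iteration: the whole string is one (possibly short) segment
        have hnil : PySem.List.pyRange d (l.length : Int) d = [] := by
          rw [PySem.List.pyRange_of_pos d _ hd0, if_neg hbig]; simp
        rw [hnil]
        have htake : l.take d.toNat = l := List.take_of_length_le (by omega)
        rcases Nat.eq_zero_or_pos l.length with h0 | h0
        · have : l = [] := List.eq_nil_of_length_eq_zero h0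
          subst this
          simp [adiLoop, pyStrMul]
        · rw [htake, ceilcnt_one d _ hd0 (by omega) (by omega)]
          simp [adiLoop, pyStrMul]

-- ===== VERDICT (by name: the statement is the Claim_ definition above) =====
theorem all_divisions_identical_py_spec : Claim_equal_all_divisions_identical_py := by
  intro s d _ hpre
  have hd1 : (1:Int) ≤ d := hpre
  unfold Spec_all_divisions_identical_py all_divisions_identical_py all_divisions_identical_py_alt
  have hfirst : PySem.List.slice s.toList (some 0) (some d)
      = s.toList.take d.toNat := by
    rw [PySem.List.slice_toNat s.toList (by omega) (by omega)]
    simp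
  simp only [hfirst]
  exact adi_main d hd1 s.toList.length s.toList le_rfl
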